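-- pv_equiv track=rewrite | github.com/Abhinav-droid-sys/AI_RED | app.py | history_preview
-- ===== SOURCE A (Python) =====
-- def history_preview(history: list) -> str:
--     if not history:
--         return ""
--     for msg in reversed(history):
--         content = (msg.get("content") or "").strip()
--         if content:
--             return content[:90]
--     return ""
-- ===== SOURCE B (Python) =====
-- def history_preview(history: list) -> str:
--     # Forward scan with an accumulator instead of a reversed early-return scan.
--     last = ""
--     for msg in history:
--         content = (msg.get("content") or "").strip()
--         if content:
--             last = content
--     return last[:90]
-- ===== Notes on version B (the rewrite author's own statement) =====
-- stated objective: alternative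
-- what changed: Replaces the reversed early-return scan with a single forward pass that keeps the last non-empty stripped content in an accumulator and truncates once at the end.
import Mathlib
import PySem

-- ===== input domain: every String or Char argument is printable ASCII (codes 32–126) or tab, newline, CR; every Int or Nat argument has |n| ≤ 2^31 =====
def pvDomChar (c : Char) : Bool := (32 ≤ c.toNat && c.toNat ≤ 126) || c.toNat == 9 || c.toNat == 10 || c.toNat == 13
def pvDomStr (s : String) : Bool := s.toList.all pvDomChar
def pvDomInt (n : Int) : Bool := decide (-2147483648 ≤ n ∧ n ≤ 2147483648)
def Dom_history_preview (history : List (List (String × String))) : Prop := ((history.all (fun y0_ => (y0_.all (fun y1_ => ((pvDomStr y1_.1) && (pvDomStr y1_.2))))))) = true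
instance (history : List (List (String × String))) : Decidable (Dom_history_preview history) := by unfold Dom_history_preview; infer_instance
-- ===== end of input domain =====

-- B replaces A's reversed early-return scan by a forward pass with a last-non-empty accumulator, truncated once at the end (alternative decomposition, same cost).


-- ===== PORT A =====
-- (msg.get("content") or "").strip() ; dict lookup is first match in the association list
def pvContent (msg : List (String × String)) : String :=
  PySem.Str.strip (((PySem.Dict.mk msg).get? "content").getD "")

-- the 'for msg in reversed(history)' loop with its early return
def pvLoopA : List (List (String × String)) → String
  | [] => ""
  | msg :: rest =>
    let content := pvContent msg
    if content ≠ "" then PySem.Str.slice content none (some 90) else pvLoopA rest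

def history_preview (history : List (List (String × String))) : String :=
  if history = [] then "" else pvLoopA history.reverse

-- ===== PORT B =====
-- forward fold: last := content whenever content is non-empty
def pvStepB (last : String) (msg : List (String × String)) : String :=
  let content := PySem.Str.strip (((PySem.Dict.mk msg).get? "content").getD "")
  if content ≠ "" then content else last

def history_preview_alt (history : List (List (String × String))) : String :=
  PySem.Str.slice (history.foldl pvStepB "") none (some 90)

-- ===== PRECONDITION & SPEC =====
def Spec_history_preview (history : List (List (String × String))) (out : String) : Prop := out = history_preview_alt history
instance (history : List (List (String × String))) (out : String) : Decidable (Spec_history_preview history out) := by unfold Spec_history_preview; infer_instance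

-- ===== CLAIM (what is proved, stated in full; the proofs are below) =====
def Claim_equal_history_preview : Prop := ∀ (history : List (List (String × String))), Dom_history_preview history → Spec_history_preview history (history_preview history)

-- ===== LEMMAS AND PROOFS =====

-- slicing the empty string gives the empty string
lemma pv_slice_empty : PySem.Str.slice "" none (some 90) = "" := by decide

-- A's loop returns the (truncated) content of the first message with non-empty content
lemma pvLoopA_find (l : List (List (String × String))) :
    pvLoopA l = ((l.find? (fun m => pvContent m ≠ "")).map
      (fun m => PySem.Str.slice (pvContent m) none (some 90))).getD "" := by
  induction l with
  | nil => rfl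
  | cons m rest ih =>
    by_cases h : pvContent m = "" <;> simp [pvLoopA, h, ih]

-- B's fold returns the content of the last message with non-empty content, else the accumulator
lemma pvFoldB_find (l : List (List (String × String))) (acc : String) :
    l.foldl pvStepB acc =
      ((l.reverse.find? (fun m => pvContent m ≠ "")).map pvContent).getD acc := by
  induction l generalizing acc with
  | nil => rfl
  | cons m rest ih =>
    rw [List.foldl_cons, ih, List.reverse_cons, List.find?_append]
    cases hf : rest.reverse.find? (fun m => pvContent m ≠ "") <;>
      simp only [pvStepB, pvContent, Option.or] <;>
        split_ifs with h <;> simp [pvContent, h]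

-- ===== VERDICT (by name: the statement is the Claim_ definition above) =====
theorem history_preview_spec : Claim_equal_history_preview := by
  intro history _
  show history_preview history = history_preview_alt history
  unfold history_preview history_preview_alt
  rw [pvLoopA_find, pvFoldB_find]
  cases hf : history.reverse.find? (fun m => pvContent m ≠ "") with
  | none =>
    by_cases h : history = []
    · simp [h, pv_slice_empty]
    · simp [h, hf, pv_slice_empty]

  | some m =>
    have hne : history ≠ [] := by
      rintro rfl; simp at hf
    simp [hne]
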